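-- pv_equiv track=rewrite | github.com/Kutay32/model_0 | harmonia_vision/data_pipeline.py | majority_pathology_per_patient
-- ===== SOURCE A (Python) =====
-- from typing import Any
--
-- def majority_pathology_per_patient(rows: list[dict[str, Any]]) -> dict[str, str]:
--     counts: dict[str, dict[str, int]] = {}
--     for r in rows:
--         pid = r["patient_id"]
--         p = r["pathology"]
--         counts.setdefault(pid, {"BENIGN": 0, "MALIGNANT": 0})
--         if p in counts[pid]:
--             counts[pid][p] += 1
--     out: dict[str, str] = {}
--     for pid, c in counts.items():
--         b, m = c["BENIGN"], c["MALIGNANT"]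
--         if b > m:
--             out[pid] = "BENIGN"
--         elif m > b:
--             out[pid] = "MALIGNANT"
--         else:
--             out[pid] = "TIE"
--     return out
-- ===== SOURCE B (Python) =====
-- def majority_pathology_per_patient(rows: list[dict[str, str]]) -> dict[str, str]:
--     # Brute force by patient: distinct patient ids in first-appearance order,
--     # then one full scan of the rows per patient to count each label.
--     pids = list(dict.fromkeys(r["patient_id"] for r in rows))
--     out: dict[str, str] = {}
--     for pid in pids:
--         b = sum(1 for r in rows if r["patient_id"] == pid and r["pathology"] == "BENIGN")
--         m = sum(1 for r in rows if r["patient_id"] == pid and r["pathology"] == "MALIGNANT")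
--         out[pid] = "BENIGN" if b > m else "MALIGNANT" if m > b else "TIE"
--     return out
-- ===== Notes on version B (the rewrite author's own statement) =====
-- stated objective: alternative
-- what changed: Replaces A's single streaming pass with per-patient counter dicts by a grouping-free brute force: dedupe the patient ids once, then rescan the full row list for each patient, counting BENIGN and MALIGNANT matches directly; no counting dictionary is maintained at all.
import Mathlib
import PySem

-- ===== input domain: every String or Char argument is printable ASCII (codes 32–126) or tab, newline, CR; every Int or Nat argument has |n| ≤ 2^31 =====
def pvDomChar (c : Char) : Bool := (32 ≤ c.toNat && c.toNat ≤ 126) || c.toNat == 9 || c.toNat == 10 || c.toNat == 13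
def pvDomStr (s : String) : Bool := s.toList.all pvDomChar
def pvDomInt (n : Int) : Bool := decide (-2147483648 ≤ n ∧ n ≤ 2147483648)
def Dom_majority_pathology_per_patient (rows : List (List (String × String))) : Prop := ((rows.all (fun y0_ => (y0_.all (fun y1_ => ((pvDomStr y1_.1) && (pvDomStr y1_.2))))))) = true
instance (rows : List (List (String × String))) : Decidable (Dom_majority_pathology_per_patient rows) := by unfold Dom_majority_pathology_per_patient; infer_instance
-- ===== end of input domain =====

-- B drops A's streaming per-patient counter dicts for a grouping-free brute force
-- (dedupe the patient ids, then rescan all rows per patient counting each label);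
-- return values proved equal on Pre_ (rows with both keys — elsewhere A raises KeyError).

-- ===== PORT A =====
-- one iteration of A's first loop (r["patient_id"]/r["pathology"] raise KeyError on a
-- missing key: those rows are excluded by Pre_; the port skips them)
def pvStepA (counts : PySem.Dict String (PySem.Dict String Int)) (r : List (String × String)) :
    PySem.Dict String (PySem.Dict String Int) :=
  match (PySem.Dict.mk r).get? "patient_id", (PySem.Dict.mk r).get? "pathology" with
  | some pid, some p =>
    let counts := counts.setdefault pid (PySem.Dict.ofList [("BENIGN", (0 : Int)), ("MALIGNANT", (0 : Int))])
    if (counts.getD pid PySem.Dict.empty).contains p then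
      counts.modify pid PySem.Dict.empty (fun c => c.modify p 0 (· + 1))
    else counts
  | _, _ => counts

def majority_pathology_per_patient (rows : List (List (String × String))) : List (String × String) :=
  let counts := rows.foldl pvStepA PySem.Dict.empty
  let out : PySem.Dict String String :=
    counts.items.foldl (fun out pc =>
      let b := pc.2.getD "BENIGN" 0
      let m := pc.2.getD "MALIGNANT" 0
      if b > m then out.insert pc.1 "BENIGN"
      else if m > b then out.insert pc.1 "MALIGNANT"
      else out.insert pc.1 "TIE") PySem.Dict.empty
  out.items

-- ===== PORT B =====
-- r["patient_id"] / r["pathology"] (total forms; exact under Pre_, where the key is present)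
def pvRowPid (r : List (String × String)) : String := (PySem.Dict.mk r).getD "patient_id" ""
def pvRowPath (r : List (String × String)) : String := (PySem.Dict.mk r).getD "pathology" ""

-- sum(1 for r in rows if r["patient_id"] == pid and r["pathology"] == lab)
def pvCountLab (rows : List (List (String × String))) (pid lab : String) : Int :=
  ((rows.filter (fun r => pvRowPid r == pid && pvRowPath r == lab)).length : Int)

def majority_pathology_per_patient_alt (rows : List (List (String × String))) : List (String × String) :=
  let pids := PySem.List.dedup (rows.map pvRowPid)   -- list(dict.fromkeys(...))
  let out : PySem.Dict String String :=
    pids.foldl (fun out pid =>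
      let b := pvCountLab rows pid "BENIGN"
      let m := pvCountLab rows pid "MALIGNANT"
      out.insert pid (if b > m then "BENIGN" else if m > b then "MALIGNANT" else "TIE"))
      PySem.Dict.empty
  out.items

-- ===== PRECONDITION & SPEC =====
-- Pre_ excludes exactly the rows on which Python A raises KeyError: a row missing the
-- "patient_id" or "pathology" key.
def Pre_majority_pathology_per_patient (rows : List (List (String × String))) : Prop :=
  ∀ r ∈ rows, "patient_id" ∈ r.map Prod.fst ∧ "pathology" ∈ r.map Prod.fst
instance (rows : List (List (String × String))) : Decidable (Pre_majority_pathology_per_patient rows) := by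
  unfold Pre_majority_pathology_per_patient; infer_instance

def pvWitness_majority_pathology_per_patient : (List (List (String × String))) :=
  [[("patient_id", "p1"), ("pathology", "BENIGN")], [("patient_id", "p1"), ("pathology", "MALIGNANT")]]

def Spec_majority_pathology_per_patient (rows : List (List (String × String))) (out : List (String × String)) : Prop := out = majority_pathology_per_patient_alt rows
instance (rows : List (List (String × String))) (out : List (String × String)) : Decidable (Spec_majority_pathology_per_patient rows out) := by unfold Spec_majority_pathology_per_patient; infer_instance

-- ===== CLAIM (what is proved, stated in full; the proofs are below) =====
def Claim_equal_majority_pathology_per_patient : Prop := ∀ (rows : List (List (String × String))), Dom_majority_pathology_per_patient rows → Pre_majority_pathology_per_patient rows → Spec_majority_pathology_per_patient rows (majority_pathology_per_patient rows)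

-- ===== LEMMAS AND PROOFS =====

-- invariant linking A's counter state after 'processed' rows with B's brute-force counts
def pvInv (processed : List (List (String × String)))
    (counts : PySem.Dict String (PySem.Dict String Int)) : Prop :=
  counts.keys = PySem.List.dedup (processed.map pvRowPid)
  ∧ (∀ k, counts.contains k = true → (counts.getD k PySem.Dict.empty).keys = ["BENIGN", "MALIGNANT"])
  ∧ (∀ k, (counts.getD k PySem.Dict.empty).getD "BENIGN" 0 = pvCountLab processed k "BENIGN")
  ∧ (∀ k, (counts.getD k PySem.Dict.empty).getD "MALIGNANT" 0 = pvCountLab processed k "MALIGNANT")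

theorem pvCountLab_append (xs : List (List (String × String))) (r : List (String × String))
    (k lab : String) :
    pvCountLab (xs ++ [r]) k lab
      = pvCountLab xs k lab + (if pvRowPid r == k && pvRowPath r == lab then 1 else 0) := by
  simp only [pvCountLab, List.filter_append, List.length_append]
  by_cases h : (pvRowPid r == k && pvRowPath r == lab) = true
  · simp [h]
  · simp [h]

theorem pvCountLab_of_not_mem (xs : List (List (String × String))) (k lab : String)
    (h : k ∉ xs.map pvRowPid) : pvCountLab xs k lab = 0 := by
  unfold pvCountLab
  rw [List.filter_eq_nil_iff.mpr]
  · rfl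
  · intro r hr hpred
    have h1 : pvRowPid r = k := by
      have := (Bool.and_eq_true _ _).mp hpred
      exact eq_of_beq this.1
    exact h (h1 ▸ List.mem_map_of_mem hr)

theorem pv_step (r : List (String × String)) (processed : List (List (String × String)))
    (counts : PySem.Dict String (PySem.Dict String Int))
    (hr : "patient_id" ∈ r.map Prod.fst ∧ "pathology" ∈ r.map Prod.fst)
    (h : pvInv processed counts) : pvInv (processed ++ [r]) (pvStepA counts r) := by
  obtain ⟨hkeys, hinner, hB, hM⟩ := h
  obtain ⟨pid, hpid⟩ : ∃ v, (PySem.Dict.mk r).get? "patient_id" = some v := by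
    cases hg : (PySem.Dict.mk r).get? "patient_id" with
    | some v => exact ⟨v, rfl⟩
    | none => rw [PySem.Dict.get?_eq_none_iff_not_mem_keys] at hg
              exact absurd hr.1 (by simpa [PySem.Dict.keys_mk] using hg)
  obtain ⟨p, hp⟩ : ∃ v, (PySem.Dict.mk r).get? "pathology" = some v := by
    cases hg : (PySem.Dict.mk r).get? "pathology" with
    | some v => exact ⟨v, rfl⟩
    | none => rw [PySem.Dict.get?_eq_none_iff_not_mem_keys] at hg
              exact absurd hr.2 (by simpa [PySem.Dict.keys_mk] using hg)
  have hpidv : pvRowPid r = pid := by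
    unfold pvRowPid; rw [PySem.Dict.getD_eq_get?_getD, hpid]; rfl
  have hpv : pvRowPath r = p := by
    unfold pvRowPath; rw [PySem.Dict.getD_eq_get?_getD, hp]; rfl
  have hmapapp : (processed ++ [r]).map pvRowPid = processed.map pvRowPid ++ [pid] := by
    simp [hpidv]
  have hdedup : PySem.List.dedup ((processed ++ [r]).map pvRowPid)
      = PySem.Set.add (PySem.Set.ofList (processed.map pvRowPid)) pid := by
    rw [hmapapp]; simp only [PySem.List.dedup_eq_ofList]
    exact PySem.Set.ofList_append_singleton _ _
  have hcontmem : counts.contains pid = true ↔ pid ∈ processed.map pvRowPid := by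
    rw [PySem.Dict.contains_iff_mem_keys, hkeys, PySem.List.dedup_eq_ofList, PySem.Set.mem_ofList]
  unfold pvInv pvStepA
  rw [hpid, hp]
  simp only
  by_cases hc : counts.contains pid = true
  · -- pid already registered
    rw [PySem.Dict.setdefault_of_contains _ _ hc]
    have hik := hinner pid hc
    have hcp : (counts.getD pid PySem.Dict.empty).contains p
        = decide (p = "BENIGN" ∨ p = "MALIGNANT") := by
      rw [PySem.Dict.contains_eq_decide_mem_keys, hik]; simp
    have hkeys' : counts.keys = PySem.List.dedup ((processed ++ [r]).map pvRowPid) := by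
      rw [hdedup, PySem.Set.add_of_mem (by rw [PySem.Set.mem_ofList]; exact hcontmem.mp hc),
        ← PySem.List.dedup_eq_ofList]
      exact hkeys
    by_cases hpm : p = "MALIGNANT"
    · subst hpm
      rw [hcp, if_pos (by simp)]
      refine ⟨by rw [PySem.Dict.keys_modify, PySem.Dict.keys_insert_of_contains _ _ hc]; exact hkeys', ?_, ?_, ?_⟩
      · intro k hk
        rw [PySem.Dict.contains_modify] at hk
        rw [PySem.Dict.getD_modify]
        by_cases hkp : k = pid
        · subst hkp
          rw [if_pos rfl, PySem.Dict.keys_modify, PySem.Dict.keys_insert_of_contains, hik]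
          rw [PySem.Dict.contains_eq_decide_mem_keys, hik]; simp
        · rw [if_neg hkp]; exact hinner k (by simpa [hkp] using hk)
      · intro k
        rw [PySem.Dict.getD_modify, pvCountLab_append]
        by_cases hkp : k = pid
        · subst hkp
          rw [if_pos rfl, PySem.Dict.getD_modify, if_neg (by decide), hB]
          simp [hpidv, hpv]
        · rw [if_neg hkp, hB]
          have : (pvRowPid r == k) = false := by simp [hpidv, Ne.symm hkp]
          simp [this]
      · intro k
        rw [PySem.Dict.getD_modify, pvCountLab_append]
        by_cases hkp : k = pid
        · subst hkp
          rw [if_pos rfl, PySem.Dict.getD_modify, if_pos rfl, hM]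
          simp [hpidv, hpv]
        · rw [if_neg hkp, hM]
          have : (pvRowPid r == k) = false := by simp [hpidv, Ne.symm hkp]
          simp [this]
    · by_cases hpb : p = "BENIGN"
      · subst hpb
        rw [hcp, if_pos (by simp)]
        refine ⟨by rw [PySem.Dict.keys_modify, PySem.Dict.keys_insert_of_contains _ _ hc]; exact hkeys', ?_, ?_, ?_⟩
        · intro k hk
          rw [PySem.Dict.contains_modify] at hk
          rw [PySem.Dict.getD_modify]
          by_cases hkp : k = pid
          · subst hkp
            rw [if_pos rfl, PySem.Dict.keys_modify, PySem.Dict.keys_insert_of_contains, hik]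
            rw [PySem.Dict.contains_eq_decide_mem_keys, hik]; simp
          · rw [if_neg hkp]; exact hinner k (by simpa [hkp] using hk)
        · intro k
          rw [PySem.Dict.getD_modify, pvCountLab_append]
          by_cases hkp : k = pid
          · subst hkp
            rw [if_pos rfl, PySem.Dict.getD_modify, if_pos rfl, hB]
            simp [hpidv, hpv]
          · rw [if_neg hkp, hB]
            have : (pvRowPid r == k) = false := by simp [hpidv, Ne.symm hkp]
            simp [this]
        · intro k
          rw [PySem.Dict.getD_modify, pvCountLab_append]
          by_cases hkp : k = pid
          · subst hkp
            rw [if_pos rfl, PySem.Dict.getD_modify, if_neg (by decide), hM]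
            simp [hpidv, hpv]
          · rw [if_neg hkp, hM]
            have : (pvRowPid r == k) = false := by simp [hpidv, Ne.symm hkp]
            simp [this]
      · rw [hcp, if_neg (by simp [hpb, hpm])]
        refine ⟨hkeys', hinner, ?_, ?_⟩
        · intro k
          rw [pvCountLab_append, hB]
          have : (pvRowPath r == "BENIGN") = false := by simp [hpv, hpb]
          simp [this]
        · intro k
          rw [pvCountLab_append, hM]
          have : (pvRowPath r == "MALIGNANT") = false := by simp [hpv, hpm]
          simp [this]
  · -- fresh pid
    have hc' : counts.contains pid = false := by simpa using hc
    have hnotmem : pid ∉ processed.map pvRowPid := fun hm => hc (hcontmem.mpr hm)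
    rw [PySem.Dict.setdefault_of_not_contains _ _ hc']
    set d0 := PySem.Dict.ofList [("BENIGN", (0 : Int)), ("MALIGNANT", (0 : Int))] with hd0
    have hgetIns : ((counts.insert pid d0).getD pid PySem.Dict.empty) = d0 :=
      PySem.Dict.getD_insert_self _ _ _ _
    have hkeys1 : (counts.insert pid d0).keys = PySem.List.dedup ((processed ++ [r]).map pvRowPid) := by
      rw [PySem.Dict.keys_insert_of_not_contains _ _ hc', hdedup,
        PySem.Set.add_of_not_mem (by rw [PySem.Set.mem_ofList]; exact hnotmem), hkeys,
        PySem.List.dedup_eq_ofList]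
    have hinner1 : ∀ k, (counts.insert pid d0).contains k = true →
        ((counts.insert pid d0).getD k PySem.Dict.empty).keys = ["BENIGN", "MALIGNANT"] := by
      intro k hk
      rw [PySem.Dict.getD_insert]
      by_cases hkp : k = pid
      · rw [if_pos hkp]; decide
      · rw [if_neg hkp]
        rw [PySem.Dict.contains_insert] at hk
        exact hinner k (by simpa [hkp] using hk)
    have hcnt0 : ∀ lab, pvCountLab processed pid lab = 0 := fun lab =>
      pvCountLab_of_not_mem _ _ _ hnotmem
    have hB1 : ∀ k, ((counts.insert pid d0).getD k PySem.Dict.empty).getD "BENIGN" 0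
        = pvCountLab processed k "BENIGN" := by
      intro k
      rw [PySem.Dict.getD_insert]
      by_cases hkp : k = pid
      · subst hkp; rw [if_pos rfl, hcnt0]; decide
      · rw [if_neg hkp]; exact hB k
    have hM1 : ∀ k, ((counts.insert pid d0).getD k PySem.Dict.empty).getD "MALIGNANT" 0
        = pvCountLab processed k "MALIGNANT" := by
      intro k
      rw [PySem.Dict.getD_insert]
      by_cases hkp : k = pid
      · subst hkp; rw [if_pos rfl, hcnt0]; decide
      · rw [if_neg hkp]; exact hM k
    have hd0keys : d0.keys = ["BENIGN", "MALIGNANT"] := by rw [hd0]; decide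
    have hcp : ((counts.insert pid d0).getD pid PySem.Dict.empty).contains p
        = decide (p = "BENIGN" ∨ p = "MALIGNANT") := by
      rw [hgetIns, PySem.Dict.contains_eq_decide_mem_keys, hd0keys]; simp
    by_cases hpm : p = "MALIGNANT"
    · subst hpm
      rw [hcp, if_pos (by simp)]
      refine ⟨by rw [PySem.Dict.keys_modify, PySem.Dict.keys_insert_of_contains _ _ (PySem.Dict.contains_insert_self _ _ _)]; exact hkeys1, ?_, ?_, ?_⟩
      · intro k hk
        rw [PySem.Dict.contains_modify] at hk
        rw [PySem.Dict.getD_modify]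
        by_cases hkp : k = pid
        · subst hkp
          rw [if_pos rfl, PySem.Dict.keys_modify, PySem.Dict.keys_insert_of_contains, hgetIns, hd0keys]
          rw [hgetIns, PySem.Dict.contains_eq_decide_mem_keys, hd0keys]; simp
        · rw [if_neg hkp]; exact hinner1 k (by simpa [hkp] using hk)
      · intro k
        rw [PySem.Dict.getD_modify, pvCountLab_append]
        by_cases hkp : k = pid
        · subst hkp
          rw [if_pos rfl, PySem.Dict.getD_modify, if_neg (by decide), hB1]
          simp [hpidv, hpv]
        · rw [if_neg hkp, hB1]
          have : (pvRowPid r == k) = false := by simp [hpidv, Ne.symm hkp]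
          simp [this]
      · intro k
        rw [PySem.Dict.getD_modify, pvCountLab_append]
        by_cases hkp : k = pid
        · subst hkp
          rw [if_pos rfl, PySem.Dict.getD_modify, if_pos rfl, hM1]
          simp [hpidv, hpv]
        · rw [if_neg hkp, hM1]
          have : (pvRowPid r == k) = false := by simp [hpidv, Ne.symm hkp]
          simp [this]
    · by_cases hpb : p = "BENIGN"
      · subst hpb
        rw [hcp, if_pos (by simp)]
        refine ⟨by rw [PySem.Dict.keys_modify, PySem.Dict.keys_insert_of_contains _ _ (PySem.Dict.contains_insert_self _ _ _)]; exact hkeys1, ?_, ?_, ?_⟩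
        · intro k hk
          rw [PySem.Dict.contains_modify] at hk
          rw [PySem.Dict.getD_modify]
          by_cases hkp : k = pid
          · subst hkp
            rw [if_pos rfl, PySem.Dict.keys_modify, PySem.Dict.keys_insert_of_contains, hgetIns, hd0keys]
            rw [hgetIns, PySem.Dict.contains_eq_decide_mem_keys, hd0keys]; simp
          · rw [if_neg hkp]; exact hinner1 k (by simpa [hkp] using hk)
        · intro k
          rw [PySem.Dict.getD_modify, pvCountLab_append]
          by_cases hkp : k = pid
          · subst hkp
            rw [if_pos rfl, PySem.Dict.getD_modify, if_pos rfl, hB1]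
            simp [hpidv, hpv]
          · rw [if_neg hkp, hB1]
            have : (pvRowPid r == k) = false := by simp [hpidv, Ne.symm hkp]
            simp [this]
        · intro k
          rw [PySem.Dict.getD_modify, pvCountLab_append]
          by_cases hkp : k = pid
          · subst hkp
            rw [if_pos rfl, PySem.Dict.getD_modify, if_neg (by decide), hM1]
            simp [hpidv, hpv]
          · rw [if_neg hkp, hM1]
            have : (pvRowPid r == k) = false := by simp [hpidv, Ne.symm hkp]
            simp [this]
      · rw [hcp, if_neg (by simp [hpb, hpm])]
        refine ⟨hkeys1, hinner1, ?_, ?_⟩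
        · intro k
          rw [pvCountLab_append, hB1]
          have : (pvRowPath r == "BENIGN") = false := by simp [hpv, hpb]
          simp [this]
        · intro k
          rw [pvCountLab_append, hM1]
          have : (pvRowPath r == "MALIGNANT") = false := by simp [hpv, hpm]
          simp [this]

theorem pv_inv (suffix processed : List (List (String × String)))
    (counts : PySem.Dict String (PySem.Dict String Int))
    (hpre : ∀ r ∈ suffix, "patient_id" ∈ r.map Prod.fst ∧ "pathology" ∈ r.map Prod.fst)
    (h : pvInv processed counts) :
    pvInv (processed ++ suffix) (suffix.foldl pvStepA counts) := by
  induction suffix generalizing processed counts with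
  | nil => simpa using h
  | cons r rs ih =>
    simp only [List.foldl_cons]
    have := ih (processed ++ [r]) (pvStepA counts r)
      (fun r' hr' => hpre r' (List.mem_cons_of_mem _ hr'))
      (pv_step r processed counts (hpre r (List.mem_cons_self)) h)
    simpa using this

theorem main_lemma (rows : List (List (String × String)))
    (hpre : ∀ r ∈ rows, "patient_id" ∈ r.map Prod.fst ∧ "pathology" ∈ r.map Prod.fst) :
    majority_pathology_per_patient rows = majority_pathology_per_patient_alt rows := by
  obtain ⟨hK, hI, hB, hM⟩ := pv_inv rows [] PySem.Dict.empty hpre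
    (by refine ⟨by simp [PySem.Dict.keys_empty, PySem.List.dedup_eq_ofList, PySem.Set.ofList_nil], ?_, ?_, ?_⟩
        · intro k hk; simp [PySem.Dict.contains_empty] at hk
        · intro k; simp [PySem.Dict.getD_empty, pvCountLab]
        · intro k; simp [PySem.Dict.getD_empty, pvCountLab])
  unfold majority_pathology_per_patient majority_pathology_per_patient_alt
  simp only [List.nil_append] at hK hB hM
  set counts := rows.foldl pvStepA PySem.Dict.empty with hcounts
  have hN : counts.keys.Nodup := by
    rw [hK, PySem.List.dedup_eq_ofList]; exact PySem.Set.nodup_ofList _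
  simp only
  have hfun : (fun (out : PySem.Dict String String) (pc : String × PySem.Dict String Int) =>
      let b := pc.2.getD "BENIGN" 0
      let m := pc.2.getD "MALIGNANT" 0
      if b > m then out.insert pc.1 "BENIGN"
      else if m > b then out.insert pc.1 "MALIGNANT"
      else out.insert pc.1 "TIE")
      = fun out pc => out.insert pc.1
          (if pc.2.getD "BENIGN" 0 > pc.2.getD "MALIGNANT" 0 then "BENIGN"
           else if pc.2.getD "MALIGNANT" 0 > pc.2.getD "BENIGN" 0 then "MALIGNANT" else "TIE") := by
    funext out pc; simp only; split_ifs <;> rfl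
  rw [hfun, PySem.Dict.items_foldl_insert_fresh counts.items Prod.fst _ PySem.Dict.empty
      (fun a _ => PySem.Dict.contains_empty _) (by simpa only [PySem.Dict.keys] using hN),
    PySem.Dict.items_foldl_insert_fresh (PySem.List.dedup (rows.map pvRowPid)) (fun a => a)
      (fun pid => if pvCountLab rows pid "BENIGN" > pvCountLab rows pid "MALIGNANT" then "BENIGN"
        else if pvCountLab rows pid "MALIGNANT" > pvCountLab rows pid "BENIGN" then "MALIGNANT" else "TIE")
      PySem.Dict.empty (fun a _ => PySem.Dict.contains_empty _)
      (by simp [PySem.List.dedup_eq_ofList, PySem.Set.nodup_ofList])]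
  rw [PySem.Dict.items_eq_map_keys counts hN PySem.Dict.empty]
  simp only [List.map_map]
  rw [show (PySem.Dict.empty : PySem.Dict String String).items = [] from rfl, List.nil_append,
    List.nil_append, hK]
  apply List.map_congr_left
  intro k hk
  simp only [Function.comp_apply]
  rw [hB, hM]

-- ===== VERDICT (by name: the statement is the Claim_ definition above) =====
theorem majority_pathology_per_patient_spec : Claim_equal_majority_pathology_per_patient := by
  intro rows _ hpre
  exact main_lemma rows hpre
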